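-- pv_equiv track=rewrite | github.com/VaHiX/CodeForces | Python/ByRound/1904/1904_B_Collecting_Game.py | solve
-- ===== SOURCE A (Python) =====
-- def solve(n, arr):
--     prefixs = [0] * n
--     newarr = sorted(arr)  # Sort the array to process elements in increasing order
--     ans = [0] * n
--     ans[-1] = n - 1  # Last element can remove all elements to its left
--     s = 0
--     map = {newarr[-1]: n - 1}  # Map original values to computed answers
--
--     # Compute prefix sums
--     for i in range(len(newarr)):
--         s += newarr[i]
--         prefixs[i] = s
--
--     # Fill the ans array from right to left using greedy logic
--     for i in range(len(newarr) - 2, -1, -1):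
--         if prefixs[i] >= newarr[i + 1]:
--             # If the sum of elements before i+1 is sufficient to include newarr[i+1],
--             # we can remove at least as many elements as from i+1
--             ans[i] = ans[i + 1]
--         else:
--             # Otherwise, we can only remove elements up to index i
--             ans[i] = i
--         map[newarr[i]] = ans[i]  # Store the mapping for original array value
--
--     # Map back the results to the original order of the array
--     for i in range(len(arr)):
--         ans[i] = map[arr[i]]
--     return ans
-- ===== SOURCE B (Python) =====
-- def solve(n, arr):
--     # Forward pass over the sorted values: a running sum too small to absorb
--     # the next value ends a block, and every position of the block stops there;
--     # a first-wins dict keyed by value then scatters the answers back into the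
--     # n-slot answer buffer.
--     sa = sorted(arr)
--     ans = [0] * n
--     ans[-1] = n - 1
--     reach = {}  # value -> answer of its first sorted occurrence
--     s = 0
--     start = 0
--     for j in range(len(sa) - 1):
--         s += sa[j]
--         if s < sa[j + 1]:  # boundary: positions start..j all stop at j
--             for i in range(start, j + 1):
--                 reach.setdefault(sa[i], j)
--             start = j + 1
--     last = ans[len(sa) - 1]  # positions past the last boundary chain into the last slot
--     for i in range(start, len(sa) - 1):
--         reach.setdefault(sa[i], last)
--     reach.setdefault(sa[-1], n - 1)  # a value first seen at the top collects everything
--     for i, v in enumerate(arr):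
--         ans[i] = reach[v]
--     return ans
-- ===== Notes on version B (the rewrite author's own statement) =====
-- stated objective: alternative
-- what changed: B replaces A's separate prefix-sum array plus backward recurrence (ans[i]=ans[i+1] or i) with a backward-overwritten value map by a single forward pass that closes blocks of sorted positions at each boundary (running sum < next value) and records each value's answer in a first-wins setdefault dict, then scatters into the answer buffer; Pre_ excludes empty arr and n < len(arr), where A raises IndexError.
import Mathlib
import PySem

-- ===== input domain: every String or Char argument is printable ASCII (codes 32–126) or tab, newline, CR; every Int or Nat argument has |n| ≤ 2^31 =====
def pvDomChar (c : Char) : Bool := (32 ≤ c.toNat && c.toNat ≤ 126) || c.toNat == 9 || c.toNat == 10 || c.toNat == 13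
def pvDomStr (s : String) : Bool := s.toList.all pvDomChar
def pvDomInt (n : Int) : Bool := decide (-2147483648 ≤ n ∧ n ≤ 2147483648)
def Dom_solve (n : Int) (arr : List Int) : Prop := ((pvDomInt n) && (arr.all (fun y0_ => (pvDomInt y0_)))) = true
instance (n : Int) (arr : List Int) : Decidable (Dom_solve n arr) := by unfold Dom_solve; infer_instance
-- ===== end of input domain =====

-- B replaces A's prefix-sum array + backward recurrence + backward-overwritten value map by one
-- forward block pass with a first-wins setdefault dict; equal outputs proved on Pre_.

-- ===== PORT A =====
def solve (n : Int) (arr : List Int) : List Int :=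
  let prefixs : List Int := List.replicate n.toNat 0
  let newarr := PySem.List.sorted arr (fun x => x) false
  let ans : List Int := List.replicate n.toNat 0
  let ans := PySem.List.pySetD ans (-1) (n - 1)                 -- ans[-1] = n - 1
  let sp := (PySem.List.pyRange 0 (newarr.length : Int) 1).foldl
      (fun (st : Int × List Int) i =>
        let s := st.1 + PySem.List.pyGetD newarr i 0
        (s, PySem.List.pySetD st.2 i s)) ((0 : Int), prefixs)
  let prefixs := sp.2
  let map0 : PySem.Dict Int Int :=
      PySem.Dict.empty.insert (PySem.List.pyGetD newarr (-1) 0) (n - 1)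
  let am := (PySem.List.pyRange ((newarr.length : Int) - 2) (-1) (-1)).foldl
      (fun (st : List Int × PySem.Dict Int Int) i =>
        let a := if PySem.List.pyGetD prefixs i 0 ≥ PySem.List.pyGetD newarr (i + 1) 0
                 then PySem.List.pyGetD st.1 (i + 1) 0
                 else i
        (PySem.List.pySetD st.1 i a, st.2.insert (PySem.List.pyGetD newarr i 0) a))
      (ans, map0)
  (PySem.List.pyRange 0 (arr.length : Int) 1).foldl
      (fun acc i => PySem.List.pySetD acc i ((am.2).getD (PySem.List.pyGetD arr i 0) 0)) am.1

-- ===== PORT B =====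
-- Transliteration of Source B. Nonnegative in-range Python indexing sa[i]/sa[j] is ported as
-- List.getD (exact there); ans[len(sa)-1], sa[-1] and reach[v] are ported with pyGetD / Dict.getD
-- (exact on every input Pre_solve admits, where those lookups cannot raise).
def solve_alt (n : Int) (arr : List Int) : List Int :=
  let sa := PySem.List.sorted arr (fun x => x) false
  let ans : List Int := List.replicate n.toNat 0
  let ans := PySem.List.pySetD ans (-1) (n - 1)                 -- ans[-1] = n - 1
  let st := (List.range (sa.length - 1)).foldl
      (fun (st : PySem.Dict Int Int × Int × Nat) j =>
        let s := st.2.1 + sa.getD j 0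
        if s < sa.getD (j + 1) 0 then
          ((List.range' st.2.2 (j + 1 - st.2.2)).foldl
             (fun d i => if d.contains (sa.getD i 0) then d
                         else d.insert (sa.getD i 0) (j : Int)) st.1,
           s, j + 1)
        else (st.1, s, st.2.2))
      (PySem.Dict.empty, (0 : Int), (0 : Nat))
  let lastv := PySem.List.pyGetD ans ((sa.length : Int) - 1) 0  -- last = ans[len(sa) - 1]
  let reach := (List.range' st.2.2 (sa.length - 1 - st.2.2)).foldl
      (fun d i => if d.contains (sa.getD i 0) then d
                  else d.insert (sa.getD i 0) lastv) st.1
  let reach := if reach.contains (PySem.List.pyGetD sa (-1) 0) then reach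
               else reach.insert (PySem.List.pyGetD sa (-1) 0) (n - 1)
  (PySem.List.enumerate arr).foldl
      (fun a p => PySem.List.pySetD a p.1 (reach.getD p.2 0)) ans

-- ===== PRECONDITION & SPEC =====
-- Pre_ excludes exactly the inputs where A raises IndexError: empty arr (ans[-1]/newarr[-1]
-- on an empty list) and n < len(arr) (prefixs[i] assignment out of range).
def Pre_solve (n : Int) (arr : List Int) : Prop := arr ≠ [] ∧ (arr.length : Int) ≤ n
instance (n : Int) (arr : List Int) : Decidable (Pre_solve n arr) := by unfold Pre_solve; infer_instance
def pvWitness_solve : Int × List Int := (3, [2, 1, 2])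

def Spec_solve (n : Int) (arr : List Int) (out : List Int) : Prop := out = solve_alt n arr
instance (n : Int) (arr : List Int) (out : List Int) : Decidable (Spec_solve n arr out) := by unfold Spec_solve; infer_instance

-- ===== CLAIM (what is proved, stated in full; the proofs are below) =====
def Claim_equal_solve : Prop := ∀ (n : Int) (arr : List Int), Dom_solve n arr → Pre_solve n arr → Spec_solve n arr (solve n arr)

-- ===== LEMMAS AND PROOFS =====

-- prefix sum of the first j+1 elements of the sorted array
def prefSum (sa : List Int) (j : Nat) : Int := (sa.take (j + 1)).sum

-- the answer at sorted position j: the nearest strict-boundary index ≥ j, else the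
-- fallback c (the initial value of cell m-1 of the answer buffer)
def refC (sa : List Int) (c : Int) (j : Nat) : Int :=
  if h : j + 1 < sa.length then
    (if prefSum sa j < sa[j + 1] then (j : Int) else refC sa c (j + 1))
  else c
termination_by sa.length - j

-- strict boundary predicate (the condition both programs test)
def bndS (sa : List Int) (j : Nat) : Prop := prefSum sa j < sa.getD (j + 1) 0

-- fallback value: n-1 when the array fills all n slots, else the untouched 0
def cVal (n : Int) (m : Nat) : Int := if m = n.toNat then n - 1 else 0

-- the value A's map / B's reach dict associates with sorted position i
def gfun (sa : List Int) (n : Int) (i : Nat) : Int :=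
  if i + 1 = sa.length then n - 1 else refC sa (cVal n sa.length) i

-- first-wins dict over sorted positions 0..k-1 with values gfun (B's reach, abstractly)
def dAt (sa : List Int) (n : Int) (k : Nat) : PySem.Dict Int Int :=
  (List.range k).foldl
    (fun d i => if d.contains (sa.getD i 0) then d
                else d.insert (sa.getD i 0) (gfun sa n i)) PySem.Dict.empty

theorem refC_eq_c (sa : List Int) (c : Int) :
    ∀ (d i : Nat), sa.length ≤ i + d →
    (∀ i', i ≤ i' → i' + 1 < sa.length → ¬ bndS sa i') → refC sa c i = c := by
  intro d
  induction d with
  | zero => intro i hd h; rw [refC, dif_neg (by omega)]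
  | succ d ih =>
      intro i hd h
      rw [refC]
      split_ifs with h1 h2
      · exfalso
        exact h i le_rfl h1 (by unfold bndS; rw [List.getD_eq_getElem _ 0 h1]; exact h2)
      · exact ih (i + 1) (by omega) (fun i' hi' => h i' (by omega))
      · rfl

theorem refC_eq_j (sa : List Int) (c : Int) :
    ∀ (d i j : Nat), j = i + d → j + 1 < sa.length →
    (∀ i', i ≤ i' → i' < j → ¬ bndS sa i') → bndS sa j → refC sa c i = (j : Int) := by
  intro d
  induction d with
  | zero =>
      intro i j hij hj hno hb
      have hji : j = i := by omega
      subst hji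
      rw [refC, dif_pos hj, if_pos (by unfold bndS at hb; rwa [List.getD_eq_getElem _ 0 hj] at hb)]
  | succ d ih =>
      intro i j hij hj hno hb
      have hi1 : i + 1 < sa.length := by omega
      rw [refC, dif_pos hi1]
      rw [if_neg (fun hc => hno i le_rfl (by omega)
            (by unfold bndS; rwa [List.getD_eq_getElem _ 0 hi1]))]
      exact ih (i + 1) j (by omega) hj (fun i' hi' => hno i' (by omega)) hb

theorem refC_last (sa : List Int) (c : Int) (h : sa ≠ []) : refC sa c (sa.length - 1) = c := by
  rw [refC, dif_neg]
  have : 0 < sa.length := List.length_pos_iff.mpr h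
  omega

theorem pySetD_neg_one (xs : List Int) (v : Int) (h : xs ≠ []) :
    PySem.List.pySetD xs (-1) v = xs.set (xs.length - 1) v := by
  have : 0 < xs.length := List.length_pos_iff.mpr h
  rw [PySem.List.pySetD, PySem.List.pySet?, PySem.List.pyIdx?]
  rw [if_neg (by omega : ¬ ((0:Int) ≤ -1)), if_pos (by omega : (-(xs.length:Int) ≤ -1))]
  norm_num

theorem fill_prefix (sa : List Int) (xs : List Int) (hx : sa.length ≤ xs.length) :
    ∀ t, t ≤ sa.length →
    (PySem.List.pyRange 0 (t : Int) 1).foldl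
      (fun (st : Int × List Int) i =>
        let s := st.1 + PySem.List.pyGetD sa i 0
        (s, PySem.List.pySetD st.2 i s)) ((0 : Int), xs)
    = ((sa.take t).sum, (List.range t).map (fun j => prefSum sa j) ++ xs.drop t) := by
  intro t ht
  induction t with
  | zero => simp [PySem.List.pyRange_one_eq_nil]
  | succ t ih =>
      have ht' : t ≤ sa.length := by omega
      have htl : t < sa.length := by omega
      rw [show ((t + 1 : Nat) : Int) = (t : Int) + 1 by push_cast; ring,
          PySem.List.pyRange_one_succ_right (by positivity), List.foldl_append, ih ht']
      simp only [List.foldl_cons, List.foldl_nil]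
      have hget : PySem.List.pyGetD sa (t : Int) 0 = sa[t] := by
        simp [PySem.List.pyGetD_natCast, List.getElem?_eq_getElem htl]
      have hsum : (sa.take t).sum + sa[t] = (sa.take (t+1)).sum := by
        rw [List.take_add_one, List.sum_append]
        simp [List.getElem?_eq_getElem htl]
      rw [hget, Prod.mk.injEq]
      refine ⟨hsum, ?_⟩
      rw [PySem.List.pySetD_natCast, List.set_append]
      have hlen : ((List.range t).map (fun j => prefSum sa j)).length = t := by simp
      rw [if_neg (by omega), hlen]
      rw [List.drop_eq_getElem_cons (by omega : t < xs.length)]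
      simp only [Nat.sub_self, List.set_cons_zero, List.range_succ, List.map_append,
        List.map_cons, List.map_nil, List.append_assoc, List.cons_append, List.nil_append]
      rw [hsum]
      have : prefSum sa t = (sa.take (t+1)).sum := rfl
      rw [this]

theorem fill_out (arr : List Int) (f : Int → Int) (xs : List Int) (hx : arr.length ≤ xs.length) :
    ∀ t, t ≤ arr.length →
    (PySem.List.pyRange 0 (t : Int) 1).foldl
      (fun acc i => PySem.List.pySetD acc i (f (PySem.List.pyGetD arr i 0))) xs
    = (arr.take t).map f ++ xs.drop t := by
  intro t ht
  induction t with
  | zero => simp [PySem.List.pyRange_one_eq_nil]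
  | succ t ih =>
      have ht' : t ≤ arr.length := by omega
      have htl : t < arr.length := by omega
      rw [show ((t + 1 : Nat) : Int) = (t : Int) + 1 by push_cast; ring,
          PySem.List.pyRange_one_succ_right (by positivity), List.foldl_append, ih ht']
      simp only [List.foldl_cons, List.foldl_nil]
      have hget : PySem.List.pyGetD arr (t : Int) 0 = arr[t] := by
        simp [PySem.List.pyGetD_natCast, List.getElem?_eq_getElem htl]
      rw [PySem.List.pySetD_natCast, List.set_append]
      have hlen : ((arr.take t).map f).length = t := by
        simp [List.length_take, Nat.min_eq_left ht']
      rw [if_neg (by omega), hlen]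
      rw [List.drop_eq_getElem_cons (by omega : t < xs.length)]
      simp only [Nat.sub_self, List.set_cons_zero]
      rw [hget]
      have hta : List.take (t+1) (List.map f arr) = List.take t (List.map f arr) ++ [f arr[t]] := by
        rw [List.take_add_one]
        simp [List.getElem?_eq_getElem htl]
      rw [← List.map_take] at hta
      rw [hta]
      simp

def InvA (sa : List Int) (n : Int) (l : Nat) (st : List Int × PySem.Dict Int Int) : Prop :=
  st.1.length = n.toNat ∧
  (∀ j, l ≤ j → j < sa.length → st.1.getD j 0 = refC sa (cVal n sa.length) j) ∧
  st.1.drop sa.length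
    = ((List.replicate n.toNat (0 : Int)).set (n.toNat - 1) (n - 1)).drop sa.length ∧
  (∀ v ∈ sa.drop l, st.2.getD v 0 = gfun sa n (l + (sa.drop l).idxOf v))

theorem backStep (sa : List Int) (n : Int) (P : List Int)
    (hP : ∀ i, i < sa.length → P.getD i 0 = prefSum sa i)
    (hmn : sa.length ≤ n.toNat)
    (l : Nat) (st : List Int × PySem.Dict Int Int)
    (hl : l + 1 < sa.length) (hi : InvA sa n (l + 1) st) :
    InvA sa n l
      (PySem.List.pySetD st.1 (l : Int)
        (if PySem.List.pyGetD P (l : Int) 0 ≥ PySem.List.pyGetD sa ((l : Int) + 1) 0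
         then PySem.List.pyGetD st.1 ((l : Int) + 1) 0 else (l : Int)),
       st.2.insert (PySem.List.pyGetD sa (l : Int) 0)
        (if PySem.List.pyGetD P (l : Int) 0 ≥ PySem.List.pyGetD sa ((l : Int) + 1) 0
         then PySem.List.pyGetD st.1 ((l : Int) + 1) 0 else (l : Int))) := by
  obtain ⟨h1, h2, h4, h3⟩ := hi
  have hll : l < sa.length := by omega
  have hgp : PySem.List.pyGetD P (l : Int) 0 = prefSum sa l := by
    rw [PySem.List.pyGetD_natCast]
    exact hP l hll
  have hcast : ((l : Int) + 1) = ((l + 1 : Nat) : Int) := by push_cast; ring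
  have hgn : PySem.List.pyGetD sa ((l : Int) + 1) 0 = sa[l + 1] := by
    rw [hcast, PySem.List.pyGetD_natCast, List.getD_eq_getElem _ 0 hl]
  have hga : PySem.List.pyGetD st.1 ((l : Int) + 1) 0 = refC sa (cVal n sa.length) (l + 1) := by
    rw [hcast, PySem.List.pyGetD_natCast]
    rw [← h2 (l + 1) le_rfl hl]
  have hval : (if PySem.List.pyGetD P (l : Int) 0 ≥ PySem.List.pyGetD sa ((l : Int) + 1) 0
         then PySem.List.pyGetD st.1 ((l : Int) + 1) 0 else (l : Int))
      = refC sa (cVal n sa.length) l := by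
    rw [hgp, hgn, hga]
    conv_rhs => rw [refC]
    rw [dif_pos hl]
    by_cases hc : prefSum sa l < sa[l + 1]
    · rw [if_neg (by omega), if_pos hc]
    · rw [if_pos (by omega), if_neg hc]
  have hgl : PySem.List.pyGetD sa (l : Int) 0 = sa[l] := by
    rw [PySem.List.pyGetD_natCast, List.getD_eq_getElem _ 0 hll]
  have hdrop : sa.drop l = sa[l] :: sa.drop (l + 1) := List.drop_eq_getElem_cons hll
  rw [hval, hgl, PySem.List.pySetD_natCast]
  refine ⟨by simpa using h1, ?_, ?_, ?_⟩
  · intro j hjl hjm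
    rcases Nat.eq_or_lt_of_le hjl with rfl | hlt
    · rw [List.getD_eq_getElem _ 0 (by simp [h1]; omega)]
      simp [List.getElem_set_self]
    · rw [List.getD_eq_getElem _ 0 (by simp [h1]; omega),
          List.getElem_set_ne (by omega)]
      rw [← h2 j (by omega) hjm, List.getD_eq_getElem _ 0 (by omega)]
  · rw [List.drop_set_of_lt hll]
    exact h4
  · intro v hv
    rw [hdrop] at hv
    have hglift : ∀ w : Nat, w + 1 < sa.length →
        refC sa (cVal n sa.length) w = gfun sa n w := by
      intro w hw
      unfold gfun
      rw [if_neg (by omega)]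
    rcases List.mem_cons.mp hv with rfl | hvr
    · rw [PySem.Dict.getD_insert_self, hdrop, List.idxOf_cons_self]
      rw [Nat.add_zero, hglift l hl]
    · by_cases hveq : v = sa[l]
      · subst hveq
        rw [PySem.Dict.getD_insert_self, hdrop, List.idxOf_cons_self]
        rw [Nat.add_zero, hglift l hl]
      · rw [PySem.Dict.getD_insert, if_neg hveq, h3 v hvr, hdrop,
            List.idxOf_cons_ne _ (by exact fun h => hveq h.symm)]
        congr 1
        omega

theorem backLoop (sa : List Int) (n : Int) (P : List Int)
    (hP : ∀ i, i < sa.length → P.getD i 0 = prefSum sa i)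
    (hmn : sa.length ≤ n.toNat) (t : Nat) :
    ∀ (st : List Int × PySem.Dict Int Int), t + 1 < sa.length → InvA sa n (t + 1) st →
    InvA sa n 0
      ((PySem.List.pyRange (t : Int) (-1) (-1)).foldl
        (fun (st : List Int × PySem.Dict Int Int) i =>
          (PySem.List.pySetD st.1 i
            (if PySem.List.pyGetD P i 0 ≥ PySem.List.pyGetD sa (i + 1) 0
             then PySem.List.pyGetD st.1 (i + 1) 0 else i),
           st.2.insert (PySem.List.pyGetD sa i 0)
            (if PySem.List.pyGetD P i 0 ≥ PySem.List.pyGetD sa (i + 1) 0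
             then PySem.List.pyGetD st.1 (i + 1) 0 else i))) st) := by
  induction t with
  | zero =>
      intro st h hi
      rw [PySem.List.pyRange_neg_one_cons (by omega), PySem.List.pyRange_neg_one_eq_nil (by omega)]
      simpa using backStep sa n P hP hmn 0 st h hi
  | succ t ih =>
      intro st h hi
      rw [PySem.List.pyRange_neg_one_cons (by omega)]
      rw [show ((t + 1 : Nat) : Int) - 1 = (t : Int) by push_cast; ring]
      simp only [List.foldl_cons]
      have step := backStep sa n P hP hmn (t + 1) st h hi
      exact ih _ (by omega) (by push_cast at step ⊢; exact step)

theorem backAll (sa : List Int) (n : Int) (P : List Int)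
    (hP : ∀ i, i < sa.length → P.getD i 0 = prefSum sa i)
    (hmn : sa.length ≤ n.toNat)
    (hsa : sa ≠ []) (st0 : List Int × PySem.Dict Int Int)
    (h0 : InvA sa n (sa.length - 1) st0) :
    InvA sa n 0
      ((PySem.List.pyRange ((sa.length : Int) - 2) (-1) (-1)).foldl
        (fun (st : List Int × PySem.Dict Int Int) i =>
          (PySem.List.pySetD st.1 i
            (if PySem.List.pyGetD P i 0 ≥ PySem.List.pyGetD sa (i + 1) 0
             then PySem.List.pyGetD st.1 (i + 1) 0 else i),
           st.2.insert (PySem.List.pyGetD sa i 0)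
            (if PySem.List.pyGetD P i 0 ≥ PySem.List.pyGetD sa (i + 1) 0
             then PySem.List.pyGetD st.1 (i + 1) 0 else i))) st0) := by
  have hpos : 0 < sa.length := List.length_pos_iff.mpr hsa
  rcases Nat.lt_or_ge sa.length 2 with h2 | h2
  · have h1 : sa.length = 1 := by omega
    rw [PySem.List.pyRange_neg_one_eq_nil (by rw [h1]; norm_num)]
    rw [h1] at h0
    simpa using h0
  · rw [show ((sa.length : Int) - 2) = ((sa.length - 2 : Nat) : Int) by omega]
    rw [show sa.length - 1 = sa.length - 2 + 1 from by omega] at h0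
    exact backLoop sa n P hP hmn (sa.length - 2) st0 (by omega) h0

-- B's block loop: after t steps the dict is dAt at the fill front k, the running sum is the
-- prefix sum, and no boundary lies in [k, t)
theorem blockLoop (sa : List Int) (n : Int) (t : Nat) (ht : t + 1 ≤ sa.length) :
    ∃ k, k ≤ t ∧
      ((List.range t).foldl
        (fun (st : PySem.Dict Int Int × Int × Nat) j =>
          let s := st.2.1 + sa.getD j 0
          if s < sa.getD (j + 1) 0 then
            ((List.range' st.2.2 (j + 1 - st.2.2)).foldl
               (fun d i => if d.contains (sa.getD i 0) then d
                           else d.insert (sa.getD i 0) (j : Int)) st.1,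
             s, j + 1)
          else (st.1, s, st.2.2))
        (PySem.Dict.empty, (0 : Int), (0 : Nat)))
      = (dAt sa n k, (sa.take t).sum, k) ∧
      (∀ i, k ≤ i → i < t → ¬ bndS sa i) := by
  induction t with
  | zero => exact ⟨0, le_rfl, by simp [dAt], fun i _ h => absurd h (by omega)⟩
  | succ t ih =>
      obtain ⟨k, hk, heq, hnob⟩ := ih (by omega)
      have htl' : t < sa.length := by omega
      have hgd : sa.getD t 0 = sa[t] := List.getD_eq_getElem _ 0 htl'
      have hsum : (sa.take t).sum + sa[t] = (sa.take (t + 1)).sum := by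
        rw [List.take_add_one, List.sum_append]
        simp [List.getElem?_eq_getElem htl']
      have hps : prefSum sa t = (sa.take (t + 1)).sum := rfl
      rw [List.range_succ, List.foldl_append, heq]
      simp only [List.foldl_cons, List.foldl_nil]
      rw [hgd, hsum, ← hps]
      by_cases hb : bndS sa t
      · rw [if_pos (show prefSum sa t < sa.getD (t + 1) 0 from hb)]
        refine ⟨t + 1, le_rfl, ?_, fun i hi him => absurd him (by omega)⟩
        rw [Prod.mk.injEq]
        refine ⟨?_, by rw [hps]⟩
        have hsplit : List.range (t + 1) = List.range' 0 k ++ List.range' k (t + 1 - k) := by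
          have h := List.range'_append (s := 0) (m := k) (n := t + 1 - k) (step := 1)
          rw [show 0 + 1 * k = k from by omega, show k + (t + 1 - k) = t + 1 from by omega] at h
          rw [List.range_eq_range']
          exact h.symm
        have hvals : ∀ (acc : PySem.Dict Int Int), ∀ i ∈ List.range' k (t + 1 - k),
            (if acc.contains (sa.getD i 0) then acc
             else acc.insert (sa.getD i 0) ((t : Nat) : Int))
            = (if acc.contains (sa.getD i 0) then acc
               else acc.insert (sa.getD i 0) (gfun sa n i)) := by
          intro acc i hi
          rw [List.mem_range'_1] at hi
          have hib : i ≤ t := by omega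
          have hgt : gfun sa n i = (t : Int) := by
            unfold gfun
            rw [if_neg (by omega),
                refC_eq_j sa (cVal n sa.length) (t - i) i t (by omega) (by omega)
                  (fun i' h1 h2 => hnob i' (by omega) (by omega)) hb]
          rw [hgt]
        conv_rhs => rw [dAt, hsplit, List.foldl_append]
        rw [PySem.List.foldl_congr_mem _ _ _ _ hvals]
        congr 1
        rw [dAt, List.range_eq_range']
      · rw [if_neg (show ¬ prefSum sa t < sa.getD (t + 1) 0 from hb)]
        refine ⟨k, by omega, by rw [hps], ?_⟩
        intro i hi him
        rcases Nat.lt_or_ge i t with h | h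
        · exact hnob i hi h
        · rw [show i = t from by omega]
          exact hb

-- B's tail loop: positions k..m-2 all get the fallback = gfun there
theorem tailExt (sa : List Int) (n : Int) (k : Nat) (hk : k + 1 ≤ sa.length)
    (hnob : ∀ i, k ≤ i → i < sa.length - 1 → ¬ bndS sa i) :
    (List.range' k (sa.length - 1 - k)).foldl
      (fun d i => if d.contains (sa.getD i 0) then d
                  else d.insert (sa.getD i 0) (cVal n sa.length)) (dAt sa n k)
    = dAt sa n (sa.length - 1) := by
  have hsplit : List.range (sa.length - 1)
      = List.range' 0 k ++ List.range' k (sa.length - 1 - k) := by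
    have h := List.range'_append (s := 0) (m := k) (n := sa.length - 1 - k) (step := 1)
    rw [show 0 + 1 * k = k from by omega,
        show k + (sa.length - 1 - k) = sa.length - 1 from by omega] at h
    rw [List.range_eq_range']
    exact h.symm
  have hvals : ∀ (acc : PySem.Dict Int Int), ∀ i ∈ List.range' k (sa.length - 1 - k),
      (if acc.contains (sa.getD i 0) then acc
       else acc.insert (sa.getD i 0) (cVal n sa.length))
      = (if acc.contains (sa.getD i 0) then acc
         else acc.insert (sa.getD i 0) (gfun sa n i)) := by
    intro acc i hi
    rw [List.mem_range'_1] at hi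
    have hgt : gfun sa n i = cVal n sa.length := by
      unfold gfun
      rw [if_neg (by omega),
          refC_eq_c sa (cVal n sa.length) (sa.length - i) i (by omega)
            (fun i' h1 h2 => hnob i' (by omega) (by omega))]
    rw [hgt]
  conv_rhs => rw [dAt, hsplit, List.foldl_append]
  rw [PySem.List.foldl_congr_mem _ _ _ _ hvals]
  congr 1
  rw [dAt, List.range_eq_range']

-- B's final setdefault of the largest value extends the dict to all m positions
theorem finalExt (sa : List Int) (n : Int) (hsa : sa ≠ []) :
    (if (dAt sa n (sa.length - 1)).contains (sa.getLast hsa)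
     then dAt sa n (sa.length - 1)
     else (dAt sa n (sa.length - 1)).insert (sa.getLast hsa) (n - 1))
    = dAt sa n sa.length := by
  have hm : 0 < sa.length := List.length_pos_iff.mpr hsa
  have hkey : sa.getLast hsa = sa.getD (sa.length - 1) 0 := by
    rw [List.getLast_eq_getElem, List.getD_eq_getElem _ 0 (by omega)]
  have hg : gfun sa n (sa.length - 1) = n - 1 := by
    unfold gfun
    rw [if_pos (by omega)]
  conv_rhs => rw [dAt, show sa.length = (sa.length - 1) + 1 from by omega,
    List.range_succ, List.foldl_append]
  simp only [List.foldl_cons, List.foldl_nil]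
  rw [← dAt, hkey, hg]

theorem fw_preserve (l : List (Int × Int)) :
    ∀ (d : PySem.Dict Int Int) (v w : Int), d.get? v = some w →
    (l.foldl (fun (d : PySem.Dict Int Int) p => if d.contains p.1 then d else d.insert p.1 p.2) d).get? v
      = some w := by
  induction l with
  | nil => intro d v w h; simpa using h
  | cons p rest ih =>
      intro d v w h
      simp only [List.foldl_cons]
      by_cases hc : d.contains p.1
      · rw [if_pos hc]; exact ih d v w h
      · rw [if_neg hc]
        apply ih
        have hne : v ≠ p.1 := by
          intro hvp
          rw [← hvp] at hc
          rw [PySem.Dict.contains_eq_isSome_get?, h] at hc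
          simp at hc
        rw [PySem.Dict.get?_insert, if_neg hne]
        exact h

theorem fw_getD (g : Nat → Int) :
    ∀ (l : List Int) (k0 : Nat) (d : PySem.Dict Int Int) (v : Int),
    v ∈ l → d.contains v = false →
    ((l.zip ((List.range' k0 l.length).map g)).foldl
        (fun (d : PySem.Dict Int Int) p => if d.contains p.1 then d else d.insert p.1 p.2) d).getD v 0
      = g (k0 + l.idxOf v) := by
  intro l
  induction l with
  | nil => intro k0 d v hv; simp at hv
  | cons a rest ih =>
      intro k0 d v hv hdc
      rw [List.length_cons, List.range'_succ, List.map_cons, List.zip_cons_cons]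
      simp only [List.foldl_cons]
      by_cases hva : v = a
      · subst hva
        rw [if_neg (by simpa using hdc)]
        have hg : (d.insert v (g k0)).get? v = some (g k0) := PySem.Dict.get?_insert_self _ _ _
        rw [PySem.Dict.getD_eq_get?_getD, fw_preserve _ _ _ _ hg]
        simp [List.idxOf_cons_self]
      · have hvr : v ∈ rest := by
          rcases List.mem_cons.mp hv with h | h
          · exact absurd h hva
          · exact h
        have step : ∀ d1 : PySem.Dict Int Int, d1.contains v = false →
            ((rest.zip ((List.range' (k0+1) rest.length).map g)).foldl
              (fun (d : PySem.Dict Int Int) p => if d.contains p.1 then d else d.insert p.1 p.2) d1).getD v 0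
            = g ((k0+1) + rest.idxOf v) := fun d1 h1 => ih (k0+1) d1 v hvr h1
        have hidx : (a :: rest).idxOf v = rest.idxOf v + 1 :=
          List.idxOf_cons_ne _ (fun h => hva h.symm)
        rw [hidx]
        by_cases hc : d.contains a
        · rw [if_pos hc, step d hdc]
          congr 1
          omega
        · rw [if_neg hc, step (d.insert a (g k0))
            (by rw [PySem.Dict.contains_insert]; simp [hva, hdc])]
          congr 1
          omega

theorem fw_getD0 (sa : List Int) (g : Nat → Int) (v : Int) (hv : v ∈ sa) :
    ((sa.zip ((List.range sa.length).map g)).foldl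
        (fun (d : PySem.Dict Int Int) p => if d.contains p.1 then d else d.insert p.1 p.2)
        PySem.Dict.empty).getD v 0 = g (sa.idxOf v) := by
  rw [List.range_eq_range']
  rw [fw_getD g sa 0 PySem.Dict.empty v hv (PySem.Dict.contains_empty v)]
  simp

-- dAt over all m positions is the first-wins fold over sa zipped with its gfun values
theorem dAt_full (sa : List Int) (n : Int) :
    dAt sa n sa.length
      = (sa.zip ((List.range sa.length).map (gfun sa n))).foldl
          (fun (d : PySem.Dict Int Int) p => if d.contains p.1 then d else d.insert p.1 p.2)
          PySem.Dict.empty := by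
  have hzip : (List.range sa.length).map (fun i => (sa.getD i 0, gfun sa n i))
      = sa.zip ((List.range sa.length).map (gfun sa n)) := by
    apply List.ext_getElem
    · simp
    · intro i h1 h2
      simp only [List.getElem_map, List.getElem_range, List.getElem_zip]
      rw [List.getD_eq_getElem _ 0 (by simpa using h1)]
  rw [dAt, ← hzip, List.foldl_map]

theorem finishA (arr : List Int) (st : List Int × PySem.Dict Int Int)
    (hx : arr.length ≤ st.1.length) :
    (PySem.List.pyRange 0 (arr.length : Int) 1).foldl
      (fun acc i => PySem.List.pySetD acc i (st.2.getD (PySem.List.pyGetD arr i 0) 0)) st.1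
    = arr.map (fun v => st.2.getD v 0) ++ st.1.drop arr.length := by
  rw [fill_out arr (fun v => st.2.getD v 0) st.1 hx _ le_rfl]
  rw [List.take_length]

-- B's enumerate scatter is the same index scatter
theorem finishB (arr : List Int) (reach : PySem.Dict Int Int) (xs : List Int)
    (hx : arr.length ≤ xs.length) :
    (PySem.List.enumerate arr).foldl
      (fun a p => PySem.List.pySetD a p.1 (reach.getD p.2 0)) xs
    = arr.map (fun v => reach.getD v 0) ++ xs.drop arr.length := by
  rw [PySem.List.enumerate_eq_map_pyRange arr 0, List.foldl_map]
  have hlen : PySem.List.len arr = (arr.length : Int) := rfl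
  rw [hlen]
  exact finishA arr (xs, reach) hx

theorem base_getD (n : Int) (m : Nat) (h1 : 1 ≤ m) (h2 : (m : Int) ≤ n) :
    ((List.replicate n.toNat (0 : Int)).set (n.toNat - 1) (n - 1)).getD (m - 1) 0
      = cVal n m := by
  have hN : 1 ≤ n.toNat := by omega
  unfold cVal
  by_cases hm : m = n.toNat
  · subst hm
    rw [if_pos rfl, List.getD_eq_getElem _ 0 (by simp; omega)]
    rw [List.getElem_set_self (by simp; omega)]
  · rw [if_neg hm, List.getD_eq_getElem _ 0 (by simp; omega)]
    rw [List.getElem_set_ne (by omega)]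
    simp

theorem solve_eq_alt (n : Int) (arr : List Int) (hne : arr ≠ []) (hn : (arr.length : Int) ≤ n) :
    solve n arr = solve_alt n arr := by
  have hlen : (PySem.List.sorted arr (fun x => x) false).length = arr.length :=
    PySem.List.length_sorted arr _ _
  have hsane : PySem.List.sorted arr (fun x => x) false ≠ [] := by
    rw [Ne, PySem.List.sorted_eq_nil_iff]; exact hne
  have hm : 0 < arr.length := List.length_pos_iff.mpr hne
  have hn1 : 1 ≤ n := by omega
  simp only [solve, solve_alt]
  rw [fill_prefix _ _ (by simp only [List.length_replicate, hlen]; omega) _ le_rfl]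
  rw [pySetD_neg_one _ _ (by simp; omega)]
  rw [PySem.List.pyGetD_neg_one _ _ hsane]
  simp only [List.length_replicate]
  have hP : ∀ i, i < (PySem.List.sorted arr (fun x => x) false).length →
      ((List.range (PySem.List.sorted arr (fun x => x) false).length).map
          (fun j => prefSum (PySem.List.sorted arr (fun x => x) false) j)
        ++ (List.replicate n.toNat (0:Int)).drop
            (PySem.List.sorted arr (fun x => x) false).length).getD i 0
      = prefSum (PySem.List.sorted arr (fun x => x) false) i := by
    intro i hi
    rw [List.getD_append _ _ 0 i (by simpa using hi)]
    rw [List.getD_eq_getElem _ 0 (by simpa using hi)]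
    simp
  have hbase : InvA (PySem.List.sorted arr (fun x => x) false) n
      ((PySem.List.sorted arr (fun x => x) false).length - 1)
      ((List.replicate n.toNat (0:Int)).set (n.toNat - 1) (n - 1),
       PySem.Dict.empty.insert ((PySem.List.sorted arr (fun x => x) false).getLast hsane)
        (n - 1)) := by
    have hml : 0 < (PySem.List.sorted arr (fun x => x) false).length := by rw [hlen]; omega
    refine ⟨by simp, ?_, rfl, ?_⟩
    · intro j hjl hjm
      have hj : j = (PySem.List.sorted arr (fun x => x) false).length - 1 := by omega
      subst hj
      rw [refC_last _ _ hsane, hlen]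
      exact base_getD n arr.length hm hn
    · intro v hv
      have hdrop : (PySem.List.sorted arr (fun x => x) false).drop
          ((PySem.List.sorted arr (fun x => x) false).length - 1)
          = [(PySem.List.sorted arr (fun x => x) false).getLast hsane] := by
        rw [List.drop_eq_getElem_cons (by omega)]
        rw [List.drop_of_length_le (by omega)]
        rw [List.getLast_eq_getElem]
      rw [hdrop] at hv
      rcases List.mem_singleton.mp hv with rfl
      rw [hdrop, PySem.Dict.getD_insert_self, List.idxOf_cons_self, Nat.add_zero]
      unfold gfun
      rw [if_pos (by omega)]
  have hres := backAll (PySem.List.sorted arr (fun x => x) false) n _ hP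
    (by rw [hlen]; omega) hsane _ hbase
  rw [finishA arr _ (by rw [hres.1]; omega)]
  -- B side
  obtain ⟨k, hk, hblk, hnob⟩ := blockLoop (PySem.List.sorted arr (fun x => x) false) n
    ((PySem.List.sorted arr (fun x => x) false).length - 1) (by omega)
  rw [hblk]
  have hcv : PySem.List.pyGetD
      ((List.replicate n.toNat (0:Int)).set (n.toNat - 1) (n - 1))
      (((PySem.List.sorted arr (fun x => x) false).length : Int) - 1) 0
      = cVal n (PySem.List.sorted arr (fun x => x) false).length := by
    rw [show (((PySem.List.sorted arr (fun x => x) false).length : Int) - 1)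
        = (((PySem.List.sorted arr (fun x => x) false).length - 1 : Nat) : Int) by
      rw [hlen]; omega]
    rw [PySem.List.pyGetD_natCast, hlen]
    exact base_getD n arr.length hm hn
  rw [hcv]
  rw [tailExt _ n k (by omega)
    (fun i h1 h2 => hnob i h1 (by omega))]
  rw [finalExt _ n hsane]
  rw [finishB arr _ _ (by simp; omega)]
  have htail := hres.2.2.1
  rw [show arr.length = (PySem.List.sorted arr (fun x => x) false).length from hlen.symm]
  rw [htail]
  congr 1
  apply List.map_congr_left
  intro v hv
  have hvs : v ∈ PySem.List.sorted arr (fun x => x) false := by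
    rw [PySem.List.mem_sorted]; exact hv
  have hA := hres.2.2.2 v (by simpa using hvs)
  simp only [List.drop_zero, Nat.zero_add] at hA
  rw [hA, dAt_full, fw_getD0 _ _ v hvs]

-- ===== VERDICT (by name: the statement is the Claim_ definition above) =====
theorem solve_spec : Claim_equal_solve := by
  intro n arr _ hpre
  exact solve_eq_alt n arr hpre.1 hpre.2
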